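-- pv_equiv track=rewrite | github.com/euberdeveloper/wikiusers | wikiusers/postprocessor/utils/elaborator.py | _create_history
-- ===== SOURCE A (Python) =====
-- def _create_history(alter_groups: list[dict], key: str) -> list[dict]:
--     history = []
--     for i, alter in enumerate(sorted(alter_groups, key=lambda el: el['timestamp'])):
--         timestamp = alter['timestamp']
--         history.append({'from': timestamp, 'to': None, key: alter[key]})
--         if i > 0:
--             history[i - 1]['to'] = timestamp
--     return history
-- ===== SOURCE B (Python) =====
-- def _create_history(alter_groups: list[dict], key: str) -> list[dict]:
--     history = []
--     next_ts = None
--     for alter in reversed(sorted(alter_groups, key=lambda el: el['timestamp'])):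
--         ts = alter['timestamp']
--         history.append({'from': ts, 'to': next_ts, key: alter[key]})
--         next_ts = ts
--     history.reverse()
--     return history
-- ===== Notes on version B (the rewrite author's own statement) =====
-- stated objective: alternative
-- what changed: A walks the sorted groups forward and mutates the previously emitted dict to back-patch its 'to' field; B walks the sorted groups in reverse carrying the successor timestamp in an accumulator, so every entry is emitted complete and immutable and no emitted dict is ever revisited.
import Mathlib
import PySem

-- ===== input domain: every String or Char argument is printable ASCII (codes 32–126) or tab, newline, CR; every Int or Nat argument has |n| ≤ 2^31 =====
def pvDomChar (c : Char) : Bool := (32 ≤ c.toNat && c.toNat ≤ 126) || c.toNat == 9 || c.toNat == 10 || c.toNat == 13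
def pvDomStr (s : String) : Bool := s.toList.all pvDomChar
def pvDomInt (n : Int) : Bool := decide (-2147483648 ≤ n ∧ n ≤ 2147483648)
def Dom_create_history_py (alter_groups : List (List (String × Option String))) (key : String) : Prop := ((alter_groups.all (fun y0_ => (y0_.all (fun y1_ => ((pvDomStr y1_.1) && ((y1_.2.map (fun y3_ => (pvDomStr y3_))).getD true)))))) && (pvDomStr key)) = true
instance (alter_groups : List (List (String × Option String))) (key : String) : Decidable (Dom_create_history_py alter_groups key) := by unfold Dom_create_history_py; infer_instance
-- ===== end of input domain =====

-- B replaces A's forward pass that back-patches the previously emitted dict with a reverse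
-- traversal carrying the successor timestamp, so every entry is emitted complete and immutable
-- (objective: alternative; same cost).

-- ===== PORT A =====
-- shared helpers: el['timestamp'], el[key] (totalized with a default; Pre_ guarantees presence),
-- the sort key (a String; Pre_ guarantees timestamps are non-None strings), and the dict literal
-- {'from': ts, 'to': t, key: el[key]} (duplicate keys overwrite in place, as in Python).
def tsOfCH (el : List (String × Option String)) : Option String :=
  ((PySem.Dict.mk el).get? "timestamp").getD none

def sortKeyCH (el : List (String × Option String)) : String := (tsOfCH el).getD ""

def entryCH (key : String) (el : List (String × Option String)) (t : Option String) :
    List (String × Option String) :=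
  ((((PySem.Dict.mk ([] : List (String × Option String))).insert "from" (tsOfCH el)).insert
      "to" t).insert key (((PySem.Dict.mk el).get? key).getD none)).items

-- one iteration of A's loop: append {'from': ts, 'to': None, key: …}, then back-patch history[i-1]['to']
def stepACH (key : String) (history : List (List (String × Option String)))
    (ia : Int × List (String × Option String)) : List (List (String × Option String)) :=
  let timestamp := tsOfCH ia.2
  let history := history ++ [entryCH key ia.2 none]
  if 0 < ia.1 then
    PySem.List.pySetD history (ia.1 - 1)
      ((PySem.Dict.mk (PySem.List.pyGetD history (ia.1 - 1) [])).insert "to" timestamp).items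
  else history

def create_history_py (alter_groups : List (List (String × Option String))) (key : String) :
    List (List (String × Option String)) :=
  (PySem.List.enumerate (PySem.List.sorted alter_groups sortKeyCH)).foldl (stepACH key) []

-- ===== PORT B =====
-- one iteration of B's loop: emit the complete entry, remember this timestamp for the predecessor
def stepBCH (key : String)
    (st : List (List (String × Option String)) × Option String)
    (alter : List (String × Option String)) :
    List (List (String × Option String)) × Option String :=
  (st.1 ++ [entryCH key alter st.2], tsOfCH alter)

def create_history_py_alt (alter_groups : List (List (String × Option String))) (key : String) :
    List (List (String × Option String)) :=
  (((PySem.List.sorted alter_groups sortKeyCH).reverse.foldl (stepBCH key) ([], none)).1).reverse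

-- ===== PRECONDITION & SPEC =====
-- Pre_ excludes: groups missing 'timestamp' or the key (Python KeyError), None timestamps
-- (TypeError once two groups are compared; a lone None group accidentally returns), and
-- key == 'to' (a dict literal with a duplicate 'to' key, where A's back-patch overwriting the
-- copied user value on all but the last entry is accidental).
def Pre_create_history_py (alter_groups : List (List (String × Option String))) (key : String) : Prop :=
  key ≠ "to" ∧ ∀ g ∈ alter_groups,
    (((PySem.Dict.mk g).get? "timestamp").getD none).isSome ∧ ((PySem.Dict.mk g).get? key).isSome
instance (alter_groups : List (List (String × Option String))) (key : String) :
    Decidable (Pre_create_history_py alter_groups key) := by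
  unfold Pre_create_history_py; infer_instance

def pvWitness_create_history_py : (List (List (String × Option String))) × String :=
  ([[("timestamp", some "2"), ("x", some "a")], [("timestamp", some "1"), ("x", some "b")]], "x")

def Spec_create_history_py (alter_groups : List (List (String × Option String))) (key : String)
    (out : List (List (String × Option String))) : Prop :=
  out = create_history_py_alt alter_groups key
instance (alter_groups : List (List (String × Option String))) (key : String)
    (out : List (List (String × Option String))) :
    Decidable (Spec_create_history_py alter_groups key out) := by
  unfold Spec_create_history_py; infer_instance

-- ===== CLAIM (what is proved, stated in full; the proofs are below) =====
def Claim_equal_create_history_py : Prop :=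
  ∀ (alter_groups : List (List (String × Option String))) (key : String),
    Dom_create_history_py alter_groups key → Pre_create_history_py alter_groups key →
    Spec_create_history_py alter_groups key (create_history_py alter_groups key)

-- ===== LEMMAS AND PROOFS =====

-- the linked history of a list of groups: each entry's 'to' is the successor's timestamp
def linkCH (key : String) : List (List (String × Option String)) → List (List (String × Option String))
  | [] => []
  | a :: rest =>
      entryCH key a (match rest with | [] => none | b :: _ => tsOfCH b) :: linkCH key rest

theorem patch_entryCH (key : String) (hk : key ≠ "to") (el : List (String × Option String))
    (t ts : Option String) :
    ((PySem.Dict.mk (entryCH key el t)).insert "to" ts).items = entryCH key el ts := by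
  by_cases hf : key = "from"
  · subst hf
    simp [entryCH, PySem.Dict.insert, PySem.Dict.contains]
  · simp [entryCH, PySem.Dict.insert, PySem.Dict.contains, Ne.symm hf, Ne.symm hk, hk]

theorem set_patchCH (key : String) (hk : key ≠ "to") :
    ∀ (p : List (List (String × Option String))) (a : List (String × Option String)), p ≠ [] →
      (linkCH key p ++ [entryCH key a none]).set (p.length - 1)
          ((PySem.Dict.mk ((linkCH key p ++ [entryCH key a none]).getD (p.length - 1) [])).insert
            "to" (tsOfCH a)).items
        = linkCH key (p ++ [a]) := by
  intro p
  induction p with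
  | nil => intro a h; exact absurd rfl h
  | cons x p' ih =>
    intro a _
    cases p' with
    | nil => simp [linkCH, patch_entryCH key hk]
    | cons y p'' =>
      have ihy := ih a (by simp)
      simp only [linkCH, List.cons_append, List.length_cons, Nat.add_sub_cancel,
        List.getD_cons_succ, List.set_cons_succ] at ihy ⊢
      rw [ihy]

theorem stepA_snocCH (key : String) (hk : key ≠ "to")
    (p : List (List (String × Option String))) (a : List (String × Option String)) :
    stepACH key (linkCH key p) ((p.length : Int), a) = linkCH key (p ++ [a]) := by
  cases p with
  | nil => simp [stepACH, linkCH]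
  | cons x p' =>
    have hpos : (0:Int) < (((x :: p').length : Nat) : Int) := by simp
    have hcast : ((((x :: p').length : Nat) : Int) - 1) = ((p'.length : Nat) : Int) := by simp
    simp only [stepACH, hpos, if_pos, hcast, PySem.List.pySetD_natCast,
      PySem.List.pyGetD_natCast]
    have h := set_patchCH key hk (x :: p') a (by simp)
    simpa using h

theorem foldACH (key : String) (hk : key ≠ "to") :
    ∀ (rest p : List (List (String × Option String))),
      (PySem.List.enumerate rest (p.length : Int)).foldl (stepACH key) (linkCH key p)
        = linkCH key (p ++ rest) := by
  intro rest
  induction rest with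
  | nil => intro p; simp [PySem.List.enumerate]
  | cons a rest' ih =>
    intro p
    rw [PySem.List.enumerate_cons, List.foldl_cons, stepA_snocCH key hk p a]
    have hc : ((p.length : Int) + 1) = (((p ++ [a]).length : Nat) : Int) := by simp
    rw [hc, ih (p ++ [a])]
    simp

theorem foldBCH (key : String) (els : List (List (String × Option String))) :
    els.foldr (fun a st => stepBCH key st a) ([], none)
      = ((linkCH key els).reverse, match els with | [] => none | a :: _ => tsOfCH a) := by
  induction els with
  | nil => rfl
  | cons a rest ih => simp only [List.foldr_cons]; rw [ih]; simp [stepBCH, linkCH]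

-- ===== VERDICT (by name: the statement is the Claim_ definition above) =====
theorem create_history_py_spec : Claim_equal_create_history_py := by
  intro alter_groups key _ hpre
  unfold Spec_create_history_py create_history_py create_history_py_alt
  rw [List.foldl_reverse, foldBCH key, List.reverse_reverse]
  simpa using foldACH key hpre.1 (PySem.List.sorted alter_groups sortKeyCH) []
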